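-- pv_equiv track=rewrite | github.com/SergeyMalyshevsky/fivt_bioinfo | 30/main.py | mark_edges
-- ===== SOURCE A (Python) =====
-- def mark_edges(genome):
--     g = []
--     for p in genome:
--         nodes = []
--         for i in p:
--             if i > 0:
--                 nodes.append(2 * i - 1)
--                 nodes.append(2 * i)
--             else:
--                 nodes.append(-2 * i)
--                 nodes.append(-2 * i - 1)
--         for j in range(len(nodes) // 2):
--             head = 1 + 2 * j
--             tail = (2 + 2 * j) % len(nodes)
--             e = (nodes[head], nodes[tail])
--             g.append(e)
--     return g
-- ===== SOURCE B (Python) =====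
-- def _ends(i):
--     return (2 * i - 1, 2 * i) if i > 0 else (-2 * i, -2 * i - 1)
--
--
-- def mark_edges(genome):
--     g = []
--     for p in genome:
--         if not p:
--             continue
--         first_head, prev_tail = _ends(p[0])
--         for i in p[1:]:
--             h, t = _ends(i)
--             g.append((prev_tail, h))
--             prev_tail = t
--         g.append((prev_tail, first_head))
--     return g
-- ===== Notes on version B (the rewrite author's own statement) =====
-- stated objective: alternative
-- what changed: B is a single streaming pass per chromosome that carries the previous gene's tail and the first gene's head as loop state, emitting each edge as the next gene arrives and closing the cycle at the end; A instead materializes a flat node array and then runs a second indexed loop with 1+2j / (2+2j) % len(nodes) modular arithmetic.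
import Mathlib
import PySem

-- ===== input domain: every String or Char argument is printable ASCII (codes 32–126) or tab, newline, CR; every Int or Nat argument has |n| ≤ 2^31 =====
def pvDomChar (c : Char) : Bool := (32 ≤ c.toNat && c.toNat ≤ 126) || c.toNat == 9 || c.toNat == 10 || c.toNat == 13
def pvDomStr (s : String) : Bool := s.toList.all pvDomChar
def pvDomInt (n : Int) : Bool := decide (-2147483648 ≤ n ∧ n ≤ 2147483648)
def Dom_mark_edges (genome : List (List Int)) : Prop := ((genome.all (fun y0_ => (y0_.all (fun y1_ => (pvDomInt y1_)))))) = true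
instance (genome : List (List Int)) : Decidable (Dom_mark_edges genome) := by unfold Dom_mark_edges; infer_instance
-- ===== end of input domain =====

-- B replaces A's node-array + modular-index second loop by a single streaming pass per
-- chromosome carrying the previous tail and the first head; objective: alternative (same cost).

-- ===== PORT A =====
-- indices head/tail are always in range (head,tail < len(nodes) whenever the loop runs), so pyGetD's default is never used
def mark_edges (genome : List (List Int)) : List (Int × Int) :=
  genome.foldl (fun g p =>
    let nodes := p.foldl (fun nodes i =>
      if i > 0 then (nodes ++ [2 * i - 1]) ++ [2 * i]
      else (nodes ++ [-2 * i]) ++ [-2 * i - 1]) []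
    (PySem.List.pyRange 0 (PySem.Int.floordiv (nodes.length : Int) 2) 1).foldl (fun g j =>
      let head : Int := 1 + 2 * j
      let tail : Int := PySem.Int.mod (2 + 2 * j) (nodes.length : Int)
      let e := (PySem.List.pyGetD nodes head 0, PySem.List.pyGetD nodes tail 0)
      g ++ [e]) g) []

-- ===== PORT B =====
def pvEnds (i : Int) : Int × Int := if i > 0 then (2 * i - 1, 2 * i) else (-2 * i, -2 * i - 1)

def mark_edges_alt (genome : List (List Int)) : List (Int × Int) :=
  genome.foldl (fun g p =>
    match p with
    | [] => g
    | i0 :: rest =>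
      let fh := (pvEnds i0).1
      let st := rest.foldl (fun (st : Int × List (Int × Int)) i =>
        ((pvEnds i).2, st.2 ++ [(st.1, (pvEnds i).1)])) ((pvEnds i0).2, g)
      st.2 ++ [(st.1, fh)]) []

-- ===== PRECONDITION & SPEC =====
def Spec_mark_edges (genome : List (List Int)) (out : List (Int × Int)) : Prop := out = mark_edges_alt genome
instance (genome : List (List Int)) (out : List (Int × Int)) : Decidable (Spec_mark_edges genome out) := by unfold Spec_mark_edges; infer_instance

-- ===== CLAIM (what is proved, stated in full; the proofs are below) =====
def Claim_equal_mark_edges : Prop := ∀ (genome : List (List Int)), Dom_mark_edges genome → Spec_mark_edges genome (mark_edges genome)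

-- ===== LEMMAS AND PROOFS =====

def pvFlat (ql : List (Int × Int)) : List Int := ql.flatMap (fun q => [q.1, q.2])

-- A's per-chromosome edges, as a map over the index range (matches A's inner loops)
def pvChromA (p : List Int) : List (Int × Int) :=
  let nodes := pvFlat (p.map pvEnds)
  (PySem.List.pyRange 0 (PySem.Int.floordiv (nodes.length : Int) 2) 1).map (fun j =>
    (PySem.List.pyGetD nodes (1 + 2 * j) 0,
     PySem.List.pyGetD nodes (PySem.Int.mod (2 + 2 * j) (nodes.length : Int)) 0))

-- intermediate pairs formulation bridging A's modular indexing and B's stream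
def pvChromMid (p : List Int) : List (Int × Int) :=
  let pairs := p.map pvEnds
  (PySem.List.pyRange 0 (pairs.length : Int) 1).map (fun j =>
    ((PySem.List.pyGetD pairs j (0, 0)).2,
     (PySem.List.pyGetD pairs (PySem.Int.mod (j + 1) (pairs.length : Int)) (0, 0)).1))

-- B's per-chromosome edges (the streaming loop with empty accumulator)
def pvZipEdges (t : Int) : List Int → List (Int × Int)
  | [] => []
  | i :: is => (t, (pvEnds i).1) :: pvZipEdges (pvEnds i).2 is

def pvFinTail (t : Int) : List Int → Int
  | [] => t
  | i :: is => pvFinTail (pvEnds i).2 is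

def pvChromB (p : List Int) : List (Int × Int) :=
  match p with
  | [] => []
  | i0 :: rest => pvZipEdges (pvEnds i0).2 rest ++ [(pvFinTail (pvEnds i0).2 rest, (pvEnds i0).1)]

theorem pvNodes_eq (p : List Int) :
    p.foldl (fun nodes i =>
      if i > 0 then (nodes ++ [2 * i - 1]) ++ [2 * i]
      else (nodes ++ [-2 * i]) ++ [-2 * i - 1]) [] = pvFlat (p.map pvEnds) := by
  have h := PySem.List.foldl_congr_mem
    (l := p) (init := ([] : List Int))
    (f := fun nodes i =>
      if i > 0 then (nodes ++ [2 * i - 1]) ++ [2 * i]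
      else (nodes ++ [-2 * i]) ++ [-2 * i - 1])
    (g := fun nodes i => nodes ++ [(pvEnds i).1, (pvEnds i).2])
    (by intro acc x _; by_cases h : x > 0 <;> simp [pvEnds, h])
  rw [h, PySem.List.foldl_append_eq_flatMap]
  simp [pvFlat, List.flatMap_map]

theorem pvFlat_length (ql : List (Int × Int)) : (pvFlat ql).length = 2 * ql.length := by
  induction ql with
  | nil => simp [pvFlat]
  | cons q t ih => simp [pvFlat] at ih ⊢; omega

theorem pvFlat_get_fst (ql : List (Int × Int)) (k : Nat) (h : k < ql.length) :
    (pvFlat ql)[2 * k]? = some (ql[k].1) := by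
  induction ql generalizing k with
  | nil => simp at h
  | cons q t ih =>
    cases k with
    | zero => simp [pvFlat]
    | succ k =>
      have h2 : 2 * (k + 1) = 2 * k + 1 + 1 := by ring
      rw [h2]
      simp only [pvFlat, List.flatMap_cons, List.cons_append, List.nil_append,
        List.getElem?_cons_succ]
      simp at h
      simpa [pvFlat] using ih k (by omega)

theorem pvFlat_get_snd (ql : List (Int × Int)) (k : Nat) (h : k < ql.length) :
    (pvFlat ql)[2 * k + 1]? = some (ql[k].2) := by
  induction ql generalizing k with
  | nil => simp at h
  | cons q t ih =>
    cases k with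
    | zero => simp [pvFlat]
    | succ k =>
      have h2 : 2 * (k + 1) + 1 = 2 * k + 1 + 1 + 1 := by ring
      rw [h2]
      simp only [pvFlat, List.flatMap_cons, List.cons_append, List.nil_append,
        List.getElem?_cons_succ]
      simp at h
      simpa [pvFlat] using ih k (by omega)

-- A's modular-index formulation equals the pairs formulation
theorem pvChromA_eq_mid (p : List Int) : pvChromA p = pvChromMid p := by
  unfold pvChromA pvChromMid
  dsimp only
  set ql : List (Int × Int) := p.map pvEnds with hql
  set n : Nat := ql.length with hn
  have hflatlen : (pvFlat ql).length = 2 * n := pvFlat_length ql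
  have hfd : PySem.Int.floordiv (((pvFlat ql).length : Nat) : Int) 2 = (n : Int) := by
    rw [hflatlen]; simp
  rw [hfd]
  rw [PySem.List.pyRange_one 0 (n : Int)]
  simp only [List.map_map]
  apply List.map_congr_left
  intro k hk
  have hk' : k < n := by simpa using List.mem_range.mp (by simpa using hk)
  have hn0 : 0 < n := by omega
  simp only [Function.comp]
  have e1 : (1 : Int) + 2 * (0 + (k : Int)) = ((2 * k + 1 : Nat) : Int) := by push_cast; ring
  have e2 : (2 : Int) + 2 * (0 + (k : Int)) = ((2 * k + 2 : Nat) : Int) := by push_cast; ring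
  have e3 : (0 : Int) + (k : Int) + 1 = ((k + 1 : Nat) : Int) := by push_cast; ring
  rw [e1, e2, e3, hflatlen]
  rw [PySem.Int.mod_natCast (2 * k + 2) (2 * n), PySem.Int.mod_natCast (k + 1) n]
  have hmod : (2 * k + 2) % (2 * n) = 2 * ((k + 1) % n) := by
    have := Nat.mul_mod_mul_left 2 (k + 1) n
    omega
  rw [hmod]
  have hlt : (k + 1) % n < n := Nat.mod_lt _ hn0
  have g1 : PySem.List.pyGetD (pvFlat ql) ((2 * k + 1 : Nat) : Int) 0 = ql[k].2 := by
    rw [PySem.List.pyGetD_natCast]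
    simp [List.getD, pvFlat_get_snd ql k hk']
  have g2 : PySem.List.pyGetD (pvFlat ql) ((2 * ((k + 1) % n) : Nat) : Int) 0
      = ql[(k + 1) % n].1 := by
    rw [PySem.List.pyGetD_natCast]
    simp [List.getD, pvFlat_get_fst ql ((k + 1) % n) hlt]
  have g3 : PySem.List.pyGetD ql ((k : Nat) : Int) (0, 0) = ql[k] := by
    rw [PySem.List.pyGetD_natCast]
    simp only [List.getD]
    rw [List.getElem?_eq_getElem (by omega : k < ql.length)]
    rfl
  have g4 : PySem.List.pyGetD ql (((k + 1) % n : Nat) : Int) (0, 0) = ql[(k + 1) % n] := by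
    rw [PySem.List.pyGetD_natCast]
    simp only [List.getD]
    rw [List.getElem?_eq_getElem (by omega : (k + 1) % n < ql.length)]
    rfl
  rw [g1, g2, show (0 : Int) + (k : Int) = ((k : Nat) : Int) by ring, g3, g4]

theorem pvZipEdges_length (js : List Int) (t : Int) :
    (pvZipEdges t js).length = js.length := by
  induction js generalizing t with
  | nil => rfl
  | cons i is ih => simp [pvZipEdges, ih]

theorem pvZipEdges_get (js : List Int) (t : Int) (k : Nat) (h : k < js.length) :
    (pvZipEdges t js)[k]? =
      some (((t :: js.map (fun i => (pvEnds i).2)).getD k 0, (pvEnds (js.getD k 0)).1)) := by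
  induction js generalizing t k with
  | nil => simp at h
  | cons i is ih =>
    cases k with
    | zero => simp [pvZipEdges, List.getD]
    | succ k =>
      simp only [pvZipEdges, List.getElem?_cons_succ]
      rw [ih (pvEnds i).2 k (by simpa using Nat.lt_of_succ_lt_succ (by simpa using h))]
      simp [List.getD]

theorem pvGetD_map (f : Int × Int → Int) (l : List (Int × Int)) (k : Nat) (h : k < l.length)
    (d : Int) (d' : Int × Int) : (l.map f).getD k d = f (l.getD k d') := by
  simp [List.getD, List.getElem?_map, List.getElem?_eq_getElem h]

theorem pvGetD_map_ends (l : List Int) (k : Nat) (h : k < l.length) (d : Int × Int) :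
    (l.map pvEnds).getD k d = pvEnds (l.getD k 0) := by
  simp [List.getD, List.getElem?_map, List.getElem?_eq_getElem h]

theorem pvFinTail_eq (js : List Int) (t : Int) :
    pvFinTail t js = (t :: js.map (fun i => (pvEnds i).2)).getD js.length 0 := by
  induction js generalizing t with
  | nil => rfl
  | cons i is ih =>
    simp only [pvFinTail, List.map_cons, List.length_cons]
    rw [ih]
    simp [List.getD]

-- the pairs formulation equals B's streaming formulation
theorem pvChromMid_eq_B (p : List Int) : pvChromMid p = pvChromB p := by
  cases p with
  | nil => simp [pvChromMid, pvChromB, PySem.List.pyRange]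
  | cons i0 rest =>
    unfold pvChromMid pvChromB
    dsimp only
    set ql : List (Int × Int) := (i0 :: rest).map pvEnds with hql
    have hqlen : ql.length = rest.length + 1 := by simp [hql]
    set n : Nat := ql.length with hn
    have hn0 : 0 < n := by omega
    have htails : ql.map (·.2) = (pvEnds i0).2 :: rest.map (fun i => (pvEnds i).2) := by
      simp [hql]
    apply List.ext_getElem?
    intro k
    by_cases hk : k < n
    · have hL : ((PySem.List.pyRange 0 ((ql.length : Nat) : Int) 1).map (fun j =>
            ((PySem.List.pyGetD ql j (0, 0)).2,
             (PySem.List.pyGetD ql (PySem.Int.mod (j + 1) ((ql.length : Nat) : Int)) (0, 0)).1)))[k]? =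
          some ((ql.getD k (0, 0)).2, (ql.getD ((k + 1) % n) (0, 0)).1) := by
        rw [PySem.List.getElem?_map_pyRange_zero _ _ _ (by exact_mod_cast hk)]
        have e3 : ((k : Nat) : Int) + 1 = ((k + 1 : Nat) : Int) := by push_cast; ring
        rw [e3, ← hn, PySem.Int.mod_natCast (k + 1) n]
        rw [PySem.List.pyGetD_natCast, PySem.List.pyGetD_natCast]
      rw [hL]
      by_cases hlast : k = rest.length
      · subst hlast
        rw [List.getElem?_append_right (by rw [pvZipEdges_length])]
        rw [pvZipEdges_length]
        simp only [Nat.sub_self, List.getElem?_cons_zero]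
        have hmod0 : (rest.length + 1) % n = 0 := by rw [← hqlen]; exact Nat.mod_self n
        rw [hmod0]
        have hsnd : (ql.getD rest.length (0, 0)).2
            = pvFinTail (pvEnds i0).2 rest := by
          rw [pvFinTail_eq, ← htails]
          rw [← pvGetD_map (fun q => q.2) ql rest.length (by omega) 0 (0, 0)]
        have hfst : (ql.getD 0 (0, 0)).1 = (pvEnds i0).1 := by simp [hql, List.getD]
        rw [hsnd, hfst]
      · have hk2 : k < rest.length := by omega
        rw [List.getElem?_append_left (by rw [pvZipEdges_length]; omega)]
        rw [pvZipEdges_get rest (pvEnds i0).2 k hk2]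
        have hmod : (k + 1) % n = k + 1 := Nat.mod_eq_of_lt (by omega)
        rw [hmod]
        have hsnd : (ql.getD k (0, 0)).2
            = (((pvEnds i0).2 :: rest.map (fun i => (pvEnds i).2)).getD k 0) := by
          rw [← htails, ← pvGetD_map (fun q => q.2) ql k (by omega) 0 (0, 0)]
        have hfst : (ql.getD (k + 1) (0, 0)).1 = (pvEnds (rest.getD k 0)).1 := by
          have : ql.getD (k + 1) (0, 0) = pvEnds (rest.getD k 0) := by
            rw [hql]
            simp only [List.map_cons, List.getD_cons_succ]
            exact pvGetD_map_ends rest k hk2 (0, 0)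
          rw [this]
        rw [hsnd, hfst]
    · have h1 : n ≤ k := by omega
      rw [List.getElem?_eq_none, List.getElem?_eq_none]
      · simp [pvZipEdges_length]; omega
      · simp [PySem.List.length_pyRange_one]; omega

-- fold with a nonempty accumulator = accumulator ++ fold from empty (B's inner loop)
theorem pvStream_shift (rest : List Int) (t : Int) (g : List (Int × Int)) :
    rest.foldl (fun (st : Int × List (Int × Int)) i =>
        ((pvEnds i).2, st.2 ++ [(st.1, (pvEnds i).1)])) (t, g)
      = (pvFinTail t rest, g ++ pvZipEdges t rest) := by
  induction rest generalizing t g with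
  | nil => simp [pvFinTail, pvZipEdges]
  | cons i is ih =>
    simp only [List.foldl_cons, pvFinTail, pvZipEdges]
    rw [ih]
    simp

theorem pvMarkA_flat (genome : List (List Int)) :
    mark_edges genome = genome.flatMap pvChromA := by
  unfold mark_edges
  have h := PySem.List.foldl_congr_mem
    (l := genome) (init := ([] : List (Int × Int)))
    (f := fun g p =>
      let nodes := p.foldl (fun nodes i =>
        if i > 0 then (nodes ++ [2 * i - 1]) ++ [2 * i]
        else (nodes ++ [-2 * i]) ++ [-2 * i - 1]) []
      (PySem.List.pyRange 0 (PySem.Int.floordiv (nodes.length : Int) 2) 1).foldl (fun g j =>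
        let head : Int := 1 + 2 * j
        let tail : Int := PySem.Int.mod (2 + 2 * j) (nodes.length : Int)
        let e := (PySem.List.pyGetD nodes head 0, PySem.List.pyGetD nodes tail 0)
        g ++ [e]) g)
    (g := fun g p => g ++ pvChromA p)
    (by
      intro acc p _
      simp only
      rw [pvNodes_eq p]
      rw [PySem.List.foldl_append_singleton_eq_map]
      rfl)
  rw [h, PySem.List.foldl_append_eq_flatMap]
  simp

theorem pvMarkB_flat (genome : List (List Int)) :
    mark_edges_alt genome = genome.flatMap pvChromB := by
  unfold mark_edges_alt
  have h := PySem.List.foldl_congr_mem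
    (l := genome) (init := ([] : List (Int × Int)))
    (f := fun g p =>
      match p with
      | [] => g
      | i0 :: rest =>
        let fh := (pvEnds i0).1
        let st := rest.foldl (fun (st : Int × List (Int × Int)) i =>
          ((pvEnds i).2, st.2 ++ [(st.1, (pvEnds i).1)])) ((pvEnds i0).2, g)
        st.2 ++ [(st.1, fh)])
    (g := fun g p => g ++ pvChromB p)
    (by
      intro acc p _
      cases p with
      | nil => simp [pvChromB]
      | cons i0 rest =>
        simp only
        rw [pvStream_shift]
        simp [pvChromB])
  rw [h, PySem.List.foldl_append_eq_flatMap]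
  simp

-- ===== VERDICT (by name: the statement is the Claim_ definition above) =====
theorem mark_edges_spec : Claim_equal_mark_edges := by
  intro genome _
  unfold Spec_mark_edges
  rw [pvMarkA_flat, pvMarkB_flat]
  congr 1
  funext p
  rw [pvChromA_eq_mid, pvChromMid_eq_B]
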